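-- pv_equiv track=rewrite | github.com/mothsART/fluxboxlauncher | lib/config.py | update_stream
-- ===== SOURCE A (Python) =====
-- def update_stream(lines, start_stream):
--     first_lines = []
--     final_lines = []
--     after_fluxbox = False
--     for line in lines:
--         if after_fluxbox or line.startswith('exec fluxbox'):
--             final_lines.append(line)
--             after_fluxbox = True
--             continue
--         if line.startswith('exec '):
--             continue
--         if line.startswith('# exec '):
--             continue
--         first_lines.append(line)
--     return ''.join(
--         ''.join(first_lines)
--         + ''.join(start_stream)
--         + ''.join(final_lines)
--     )
-- ===== SOURCE B (Python) =====
-- def update_stream(lines, start_stream):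
--     idx = next((i for i, l in enumerate(lines) if l.startswith('exec fluxbox')), len(lines))
--     head = [l for l in lines[:idx]
--             if not (l.startswith('exec ') or l.startswith('# exec '))]
--     return ''.join(head) + ''.join(start_stream) + ''.join(lines[idx:])
-- ===== Notes on version B (the rewrite author's own statement) =====
-- stated objective: simpler
-- what changed: Replaces A's single flag-driven loop maintaining two accumulators with a find-index of the first 'exec fluxbox' marker, a prefix filter comprehension and a suffix slice.
import Mathlib
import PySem

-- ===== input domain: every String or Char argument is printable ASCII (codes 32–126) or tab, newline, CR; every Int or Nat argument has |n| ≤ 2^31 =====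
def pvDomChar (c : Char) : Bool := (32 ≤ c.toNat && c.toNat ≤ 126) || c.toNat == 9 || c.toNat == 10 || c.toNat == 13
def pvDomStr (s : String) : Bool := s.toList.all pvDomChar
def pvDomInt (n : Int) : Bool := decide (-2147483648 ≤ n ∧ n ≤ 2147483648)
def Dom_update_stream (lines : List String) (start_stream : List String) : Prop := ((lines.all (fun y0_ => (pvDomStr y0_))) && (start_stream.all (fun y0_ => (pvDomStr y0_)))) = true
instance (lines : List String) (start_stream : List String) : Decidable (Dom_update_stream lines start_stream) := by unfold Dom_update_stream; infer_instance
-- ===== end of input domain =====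

-- B replaces A's flag-driven single pass (two accumulators + a boolean) by: find the index of the
-- first 'exec fluxbox' line, filter the prefix, keep the suffix as a slice — simpler decomposition.

-- shared prefix tests (the literal startswith checks both Pythons perform)
def pvMarker (l : String) : Bool := PySem.Str.startswith l "exec fluxbox"
def pvIsExec (l : String) : Bool := PySem.Str.startswith l "exec "
def pvIsCommentExec (l : String) : Bool := PySem.Str.startswith l "# exec "

-- ===== PORT A =====
-- loop state: (first_lines, final_lines, after_fluxbox)
def pvStepA (s : List String × List String × Bool) (line : String) : List String × List String × Bool :=
  if s.2.2 || pvMarker line then (s.1, s.2.1 ++ [line], true)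
  else if pvIsExec line then s
  else if pvIsCommentExec line then s
  else (s.1 ++ [line], s.2.1, s.2.2)

-- the outer ''.join(<a single str>) in A is the identity on strings and is ported as such
def update_stream (lines : List String) (start_stream : List String) : String :=
  let r := lines.foldl pvStepA ([], [], false)
  PySem.Str.join "" r.1 ++ PySem.Str.join "" start_stream ++ PySem.Str.join "" r.2.1

-- ===== PORT B =====
-- Source B: idx = first index with marker (len if none); head = filtered prefix; tail = suffix slice
def update_stream_alt (lines : List String) (start_stream : List String) : String :=
  let idx := lines.findIdx pvMarker
  let head := (lines.take idx).filter (fun l => !(pvIsExec l || pvIsCommentExec l))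
  PySem.Str.join "" head ++ PySem.Str.join "" start_stream ++ PySem.Str.join "" (lines.drop idx)

-- ===== PRECONDITION & SPEC =====
def Spec_update_stream (lines : List String) (start_stream : List String) (out : String) : Prop := out = update_stream_alt lines start_stream
instance (lines : List String) (start_stream : List String) (out : String) : Decidable (Spec_update_stream lines start_stream out) := by unfold Spec_update_stream; infer_instance

-- ===== CLAIM (what is proved, stated in full; the proofs are below) =====
def Claim_equal_update_stream : Prop := ∀ (lines : List String) (start_stream : List String), Dom_update_stream lines start_stream → Spec_update_stream lines start_stream (update_stream lines start_stream)

-- ===== LEMMAS AND PROOFS =====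
theorem pvFoldA_true : ∀ (ls first final : List String),
    ls.foldl pvStepA (first, final, true) = (first, final ++ ls, true) := by
  intro ls
  induction ls with
  | nil => intro first final; simp
  | cons l rest ih =>
      intro first final
      simp only [List.foldl_cons, pvStepA, Bool.true_or]
      simp [ih]

theorem pvFoldA_false : ∀ (ls first final : List String),
    ls.foldl pvStepA (first, final, false) =
      (first ++ (ls.take (ls.findIdx pvMarker)).filter (fun l => !(pvIsExec l || pvIsCommentExec l)),
       final ++ ls.drop (ls.findIdx pvMarker),
       ls.any pvMarker) := by
  intro ls
  induction ls with
  | nil => intro first final; simp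
  | cons l rest ih =>
      intro first final
      by_cases hm : pvMarker l = true
      · simp [pvStepA, hm, pvFoldA_true, List.findIdx_cons]
      · have hm' : pvMarker l = false := by simpa using hm
        by_cases he : pvIsExec l = true
        · simp [pvStepA, hm', he, ih, List.findIdx_cons]
        · have he' : pvIsExec l = false := by simpa using he
          by_cases hc : pvIsCommentExec l = true
          · simp [pvStepA, hm', he', hc, ih, List.findIdx_cons]
          · have hc' : pvIsCommentExec l = false := by simpa using hc
            simp [pvStepA, hm', he', hc', ih, List.findIdx_cons]

-- ===== VERDICT (by name: the statement is the Claim_ definition above) =====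
theorem update_stream_spec : Claim_equal_update_stream := by
  intro lines start_stream _
  unfold Spec_update_stream update_stream update_stream_alt
  rw [pvFoldA_false]
  simp
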